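-- pv_equiv track=rewrite | github.com/ealvan/SegInformatica | permutation_cipher.py | general_serie
-- ===== SOURCE A (Python) =====
-- def general_serie(plain_text):
--     serie = []
--     seed = 1
--     distance = 2
--     n = len(plain_text)
--     for i in range(len(plain_text)):
--         serie.append(seed+(i-1)*distance)
--     return serie
-- ===== SOURCE B (Python) =====
-- def general_serie(plain_text):
--     serie = []
--     current = 1 - 2  # seed - distance
--     for _ in plain_text:
--         serie.append(current)
--         current += 2
--     return serie
-- ===== Notes on version B (the rewrite author's own statement) =====
-- stated objective: alternative
-- what changed: B replaces the per-index closed-form expression seed+(i-1)*distance with a running accumulator started at seed-distance and stepped by the distance (no per-element multiplication), looping over the characters instead of range(len(...)).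
import Mathlib
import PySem

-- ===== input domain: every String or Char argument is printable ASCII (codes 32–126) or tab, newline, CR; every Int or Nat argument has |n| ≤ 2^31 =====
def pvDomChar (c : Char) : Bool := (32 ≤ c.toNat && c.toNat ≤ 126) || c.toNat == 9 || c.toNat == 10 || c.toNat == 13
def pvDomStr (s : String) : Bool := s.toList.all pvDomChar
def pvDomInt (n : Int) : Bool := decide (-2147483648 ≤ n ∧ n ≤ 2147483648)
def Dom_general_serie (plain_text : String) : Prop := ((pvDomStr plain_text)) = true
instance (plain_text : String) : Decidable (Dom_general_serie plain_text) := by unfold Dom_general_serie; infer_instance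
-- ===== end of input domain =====

-- B replaces A's per-index closed form seed+(i-1)*distance by a running accumulator stepped by the distance; same values, same cost.


-- ===== PORT A =====
-- for i in range(len(plain_text)): serie.append(seed + (i-1)*distance)
def general_serie (plain_text : String) : List Int :=
  let seed : Int := 1
  let distance : Int := 2
  (PySem.List.pyRange 0 (PySem.Str.len plain_text) 1).foldl
    (fun serie i => serie ++ [seed + (i - 1) * distance]) []

-- ===== PORT B =====
-- running accumulator: current = seed - distance, append then step by distance, once per character
def general_serie_alt_go (chars : List Char) (current : Int) : List Int :=
  match chars with
  | [] => []
  | _ :: rest => current :: general_serie_alt_go rest (current + 2)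

def general_serie_alt (plain_text : String) : List Int :=
  general_serie_alt_go plain_text.toList (1 - 2)

-- ===== PRECONDITION & SPEC =====
def Spec_general_serie (plain_text : String) (out : List Int) : Prop := out = general_serie_alt plain_text
instance (plain_text : String) (out : List Int) : Decidable (Spec_general_serie plain_text out) := by unfold Spec_general_serie; infer_instance

-- ===== CLAIM (what is proved, stated in full; the proofs are below) =====
def Claim_equal_general_serie : Prop := ∀ (plain_text : String), Dom_general_serie plain_text → Spec_general_serie plain_text (general_serie plain_text)

-- ===== LEMMAS AND PROOFS =====

-- A's fold over range(a, a+|chars|) equals B's accumulator recursion on chars started at 1+(a-1)*2.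
theorem fold_eq_go (chars : List Char) (a : Int) (acc : List Int) :
    (PySem.List.pyRange a (a + chars.length) 1).foldl
        (fun serie i => serie ++ [(1 : Int) + (i - 1) * 2]) acc
      = acc ++ general_serie_alt_go chars (1 + (a - 1) * 2) := by
  induction chars generalizing a acc with
  | nil => simp [general_serie_alt_go, PySem.List.pyRange_one_eq_nil]
  | cons c rest ih =>
      rw [PySem.List.pyRange_one_cons (by simp)]
      simp only [List.foldl_cons]
      rw [show a + (c :: rest).length = (a + 1) + rest.length by simp; ring,
        ih (a + 1) (acc ++ [1 + (a - 1) * 2])]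
      simp only [general_serie_alt_go, List.append_assoc, List.singleton_append]
      norm_num
      congr 1
      ring

-- ===== VERDICT (by name: the statement is the Claim_ definition above) =====
theorem general_serie_spec : Claim_equal_general_serie := by
  intro s _
  unfold Spec_general_serie general_serie general_serie_alt
  simp only [PySem.Str.len_eq]
  have h := fold_eq_go s.toList 0 []
  rw [zero_add] at h
  rw [h]
  norm_num
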